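-- pv_equiv track=rewrite | github.com/blago-white/pretty-telegram-bot | src/prettybot/bot/messages/handlers/_cities_list_generator.py | _search_cities_by_coincidence
-- ===== SOURCE A (Python) =====
-- def _search_cities_by_coincidence(string_idx: int, city: str, cities: dict[str], length_border: int) -> list:
--     compressed_cities_list = [correct_city.capitalize()
--                               for correct_city in cities
--                               if correct_city[:string_idx]
--                               == city[:string_idx]]
--
--     if len(compressed_cities_list) <= length_border:
--         return [cities[correct_city] for correct_city in cities if correct_city[:string_idx] == city[:string_idx]]
--
--     return compressed_cities_list
-- ===== SOURCE B (Python) =====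
-- def _search_cities_by_coincidence(string_idx: int, city: str, cities: dict, length_border: int) -> list:
--     # Build a hash index grouping every dict entry by its key's prefix
--     # (key[:string_idx]) into buckets of (capitalized_name, value) pairs,
--     # then read off the single bucket for the query city's prefix.
--     # No filtering pass over the dict against the query at all.
--     buckets = {}
--     for key, value in cities.items():
--         buckets.setdefault(key[:string_idx], []).append((key.capitalize(), value))
--     bucket = buckets.get(city[:string_idx], [])
--     if len(bucket) <= length_border:
--         return [v for _, v in bucket]
--     return [c for c, _ in bucket]
-- ===== Notes on version B (the rewrite author's own statement) =====
-- stated objective: alternative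
-- what changed: Replaces A's two prefix-filtered scans of the dict (with a per-key lookup in the second) by building a hash index that groups all entries by key prefix into buckets of (capitalized,value) pairs, then answering from the single bucket for the query prefix.
import Mathlib
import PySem

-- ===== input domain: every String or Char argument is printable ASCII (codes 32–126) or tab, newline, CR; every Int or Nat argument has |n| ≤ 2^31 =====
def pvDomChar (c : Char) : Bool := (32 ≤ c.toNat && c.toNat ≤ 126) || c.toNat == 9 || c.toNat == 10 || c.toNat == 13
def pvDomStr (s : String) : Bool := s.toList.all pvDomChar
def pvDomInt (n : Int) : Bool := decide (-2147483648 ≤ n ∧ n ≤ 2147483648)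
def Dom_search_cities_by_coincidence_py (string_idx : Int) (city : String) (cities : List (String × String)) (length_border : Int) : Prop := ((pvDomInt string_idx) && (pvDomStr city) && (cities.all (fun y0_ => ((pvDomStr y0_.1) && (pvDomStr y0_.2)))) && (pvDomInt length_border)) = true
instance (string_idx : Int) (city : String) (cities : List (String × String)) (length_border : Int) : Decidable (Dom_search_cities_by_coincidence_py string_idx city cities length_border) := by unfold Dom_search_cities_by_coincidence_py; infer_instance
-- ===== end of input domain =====

-- B replaces A's two prefix-filtered scans of the dict by a hash index grouping all entries by key prefix, then reads the one bucket for the query prefix; objective: alternative.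
-- ===== PORT A =====
-- str.capitalize(): first char uppercased, rest lowercased — exact on the ASCII domain (ported by hand; PySem has no capitalize)
def pyCapitalize (s : String) : String :=
  match s.toList with
  | [] => s
  | c :: rest => String.ofList (PySem.Chars.upperChar c :: PySem.Chars.lower rest)

def search_cities_by_coincidence_py (string_idx : Int) (city : String) (cities : List (String × String)) (length_border : Int) : List String :=
  let d := PySem.Dict.ofList cities
  let compressed_cities_list :=
    (d.keys.filter (fun k =>
      PySem.Str.slice k none (some string_idx) == PySem.Str.slice city none (some string_idx))).map pyCapitalize
  if (compressed_cities_list.length : Int) ≤ length_border then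
    (d.keys.filter (fun k =>
      PySem.Str.slice k none (some string_idx) == PySem.Str.slice city none (some string_idx))).map (fun k => d.getD k "")
  else compressed_cities_list

-- ===== PORT B =====
def search_cities_by_coincidence_py_alt (string_idx : Int) (city : String) (cities : List (String × String)) (length_border : Int) : List String :=
  let d := PySem.Dict.ofList cities
  -- buckets.setdefault(key[:string_idx], []).append((key.capitalize(), value)) == modify with default [] appending
  let buckets := d.items.foldl
    (fun (b : PySem.Dict String (List (String × String))) kv =>
      b.modify (PySem.Str.slice kv.1 none (some string_idx)) [] (· ++ [(pyCapitalize kv.1, kv.2)]))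
    PySem.Dict.empty
  let bucket := buckets.getD (PySem.Str.slice city none (some string_idx)) []
  if (bucket.length : Int) ≤ length_border then bucket.map (·.2) else bucket.map (·.1)

-- ===== PRECONDITION & SPEC =====
def Spec_search_cities_by_coincidence_py (string_idx : Int) (city : String) (cities : List (String × String)) (length_border : Int) (out : List String) : Prop := out = search_cities_by_coincidence_py_alt string_idx city cities length_border
instance (string_idx : Int) (city : String) (cities : List (String × String)) (length_border : Int) (out : List String) : Decidable (Spec_search_cities_by_coincidence_py string_idx city cities length_border out) := by unfold Spec_search_cities_by_coincidence_py; infer_instance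

-- ===== CLAIM =====
def Claim_equal_search_cities_by_coincidence_py : Prop := ∀ (string_idx : Int) (city : String) (cities : List (String × String)) (length_border : Int), Dom_search_cities_by_coincidence_py string_idx city cities length_border → Spec_search_cities_by_coincidence_py string_idx city cities length_border (search_cities_by_coincidence_py string_idx city cities length_border)

-- ===== LEMMAS AND PROOFS =====

theorem search_cities_by_coincidence_py_spec : Claim_equal_search_cities_by_coincidence_py := by
  intro string_idx city cities length_border _
  unfold Spec_search_cities_by_coincidence_py
  unfold search_cities_by_coincidence_py search_cities_by_coincidence_py_alt
  dsimp only
  set d := PySem.Dict.ofList cities with hd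
  set pfx := PySem.Str.slice city none (some string_idx) with hpfx
  set g : String × String → String × (String × String) :=
    fun kv => (PySem.Str.slice kv.1 none (some string_idx), (pyCapitalize kv.1, kv.2)) with hg
  -- B's grouping loop, reshaped as a foldl over the mapped list, is a grouping loop the library characterises
  have hfold : d.items.foldl
      (fun (b : PySem.Dict String (List (String × String))) kv =>
        b.modify (PySem.Str.slice kv.1 none (some string_idx)) [] (· ++ [(pyCapitalize kv.1, kv.2)]))
      PySem.Dict.empty
    = (d.items.map g).foldl
        (fun (b : PySem.Dict String (List (String × String))) p => b.modify p.1 [] (· ++ [p.2]))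
        PySem.Dict.empty := by
    rw [List.foldl_map]
  rw [hfold, PySem.Dict.getD_foldl_modify_append, PySem.Dict.getD_empty]
  have hfm : (d.items.map g).filter (fun p => p.1 == pfx)
      = (d.items.filter (fun kv => PySem.Str.slice kv.1 none (some string_idx) == pfx)).map g := by
    rw [List.filter_map]; rfl
  rw [hfm, List.nil_append, List.map_map, List.map_map, List.map_map]
  set q : String → Bool := fun k => PySem.Str.slice k none (some string_idx) == pfx with hq
  have hkeys : d.keys.filter q = (d.items.filter (fun kv => q kv.1)).map Prod.fst := by
    have : d.keys = d.items.map Prod.fst := rfl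
    rw [this, List.filter_map]; rfl
  have hcaps : (d.keys.filter q).map pyCapitalize
      = (d.items.filter (fun kv => q kv.1)).map ((·.1) ∘ Prod.snd ∘ g) := by
    rw [hkeys, List.map_map]; rfl
  have hvals : (d.keys.filter q).map (fun k => d.getD k "")
      = (d.items.filter (fun kv => q kv.1)).map ((·.2) ∘ Prod.snd ∘ g) := by
    rw [hkeys, List.map_map]
    apply List.map_congr_left
    intro kv hkv
    have hmem : kv ∈ d.items := List.mem_of_mem_filter hkv
    exact PySem.Dict.getD_of_mem_items (k := kv.1) (v := kv.2) (d := d)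
      hmem (PySem.Dict.nodup_keys_ofList cities) ""
  rw [hcaps, hvals]
  simp only [List.length_map, List.map_map] at *
  rfl
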